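-- pv_equiv track=rewrite | github.com/whanhee97/Algorithms | Programmers/prog12987.py | solution
-- ===== SOURCE A (Python) =====
-- def solution(A, B):
--     answer = 0
--     sortedA = sorted(A)
--     sortedB = sorted(B)
--     for i in sortedA:
--         while sortedB:
--             temp = sortedB.pop(0)
--             if temp > i:
--                 answer += 1
--                 break
--     return answer
-- ===== SOURCE B (Python) =====
-- def solution(A, B):
--     sa = sorted(A)
--     sb = sorted(B)
--     j = 0
--     answer = 0
--     for a in sa:
--         while j < len(sb) and sb[j] <= a:
--             j += 1
--         if j < len(sb):
--             answer += 1
--             j += 1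
--     return answer
-- ===== Notes on version B (the rewrite author's own statement) =====
-- stated objective: faster
-- what changed: Replaces the repeated O(n) pop(0) destruction of the sorted B list with a single advancing index (two-pointer scan over the two sorted arrays).
import Mathlib
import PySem

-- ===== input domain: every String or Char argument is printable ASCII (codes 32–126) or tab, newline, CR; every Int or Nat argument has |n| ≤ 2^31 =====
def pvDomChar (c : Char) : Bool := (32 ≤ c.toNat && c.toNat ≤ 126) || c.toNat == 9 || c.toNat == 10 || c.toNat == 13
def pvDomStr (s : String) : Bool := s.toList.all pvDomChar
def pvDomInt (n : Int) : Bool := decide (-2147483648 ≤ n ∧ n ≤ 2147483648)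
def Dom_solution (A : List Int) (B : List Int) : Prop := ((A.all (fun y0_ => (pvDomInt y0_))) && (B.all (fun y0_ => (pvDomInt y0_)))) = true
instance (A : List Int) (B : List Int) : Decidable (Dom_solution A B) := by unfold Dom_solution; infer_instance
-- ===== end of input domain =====

-- B replaces A's repeated pop(0) on the sorted B-list with a single advancing index (two-pointer scan): O(n log n) instead of O(n^2).


-- ===== PORT A =====
-- inner while loop: pop from the front of L until an element > a is found (count 1) or L is exhausted
def solInner (a : Int) (L : List Int) : Int × List Int :=
  match L with
  | [] => (0, [])
  | t :: rest => if t > a then (1, rest) else solInner a rest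

-- outer for loop over sortedA, threading answer and the mutable sortedB list
def solLoopA (sa : List Int) (answer : Int) (L : List Int) : Int :=
  match sa with
  | [] => answer
  | a :: rest =>
    let p := solInner a L
    solLoopA rest (answer + p.1) p.2

def solution (A : List Int) (B : List Int) : Int :=
  solLoopA (PySem.List.sorted A (fun x => x)) 0 (PySem.List.sorted B (fun x => x))

-- ===== PORT B =====
-- while j < len(sb) and sb[j] <= a: j += 1
def solSkip (sb : List Int) (a : Int) (j : Nat) : Nat :=
  if h : j < sb.length then
    if sb[j] ≤ a then solSkip sb a (j + 1) else j
  else j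
termination_by sb.length - j

-- for a in sa: advance j past elements ≤ a; if an element remains, match it
def solLoopB (sb : List Int) (sa : List Int) (j : Nat) (answer : Int) : Int :=
  match sa with
  | [] => answer
  | a :: rest =>
    let j' := solSkip sb a j
    if j' < sb.length then solLoopB sb rest (j' + 1) (answer + 1)
    else solLoopB sb rest j' answer

def solution_alt (A : List Int) (B : List Int) : Int :=
  solLoopB (PySem.List.sorted B (fun x => x)) (PySem.List.sorted A (fun x => x)) 0 0

-- ===== PRECONDITION & SPEC =====
def Spec_solution (A : List Int) (B : List Int) (out : Int) : Prop := out = solution_alt A B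
instance (A : List Int) (B : List Int) (out : Int) : Decidable (Spec_solution A B out) := by unfold Spec_solution; infer_instance

-- ===== CLAIM (what is proved, stated in full; the proofs are below) =====
def Claim_equal_solution : Prop := ∀ (A : List Int) (B : List Int), Dom_solution A B → Spec_solution A B (solution A B)

-- ===== LEMMAS AND PROOFS =====

-- A's inner pop-loop on the suffix (sb.drop j) equals B's index advance
theorem solInner_drop (sb : List Int) (a : Int) (j : Nat) :
    solInner a (sb.drop j) =
      if solSkip sb a j < sb.length then (1, sb.drop (solSkip sb a j + 1)) else (0, []) := by
  by_cases h : j < sb.length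
  · rw [List.drop_eq_getElem_cons h]
    by_cases hle : sb[j] ≤ a
    · have hthis : solInner a (sb[j] :: sb.drop (j + 1)) = solInner a (sb.drop (j + 1)) := by
        simp [solInner, not_lt.mpr hle]
      have hstep : solSkip sb a j = solSkip sb a (j + 1) := by
        rw [solSkip]; simp [h, hle]
      rw [hthis, solInner_drop sb a (j + 1), hstep]
    · have hgt : a < sb[j] := lt_of_not_ge hle
      have hstep : solSkip sb a j = j := by
        rw [solSkip]; simp [h, hle]
      rw [hstep]
      simp [solInner, hgt, h]
  · have hd : sb.drop j = [] := List.drop_eq_nil_of_le (le_of_not_gt h)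
    have hstep : solSkip sb a j = j := by
      rw [solSkip]; simp [h]
    rw [hd, hstep]
    simp [solInner, h]
termination_by sb.length - j

-- the index advance never passes the end of sb (from a start within bounds)
theorem solSkip_le (sb : List Int) (a : Int) (k : Nat) (hk : k ≤ sb.length) :
    solSkip sb a k ≤ sb.length := by
  fun_induction solSkip sb a k with
  | case1 k hlt hle ih => exact ih (by omega)
  | case2 k hlt hgt => omega
  | case3 k hlt => exact hk

theorem solLoop_eq (sa sb : List Int) (j : Nat) (answer : Int) (hj : j ≤ sb.length) :
    solLoopA sa answer (sb.drop j) = solLoopB sb sa j answer := by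
  induction sa generalizing j answer with
  | nil => rfl
  | cons a rest ih =>
    rw [solLoopA, solLoopB, solInner_drop]
    by_cases h : solSkip sb a j < sb.length
    · simp only [if_pos h]
      exact ih (solSkip sb a j + 1) (answer + 1) (by omega)
    · simp only [if_neg h]
      have heq : solSkip sb a j = sb.length :=
        le_antisymm (solSkip_le sb a j hj) (le_of_not_gt h)
      have hd : sb.drop sb.length = ([] : List Int) := by simp
      calc solLoopA rest (answer + 0) ([] : List Int)
          = solLoopA rest answer (sb.drop (solSkip sb a j)) := by rw [add_zero, heq, hd]
        _ = solLoopB sb rest (solSkip sb a j) answer := ih _ answer (by omega)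

-- ===== VERDICT (by name: the statement is the Claim_ definition above) =====
theorem solution_spec : Claim_equal_solution := by
  intro A B _
  unfold Spec_solution solution solution_alt
  simpa using solLoop_eq (PySem.List.sorted A (fun x => x)) (PySem.List.sorted B (fun x => x)) 0 0 (Nat.zero_le _)
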